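-- pv_equiv track=rewrite | github.com/huzzle-app/coding-rl-envs | python/ionveil/services/incidents/lifecycle.py | _auto_triage_priority
-- ===== SOURCE A (Python) =====
-- from typing import Any, Optional
--
-- AUTO_TRIAGE_KEYWORDS: dict[str, int] = {
--     "explosion": 1, "active shooter": 1, "mass casualty": 1,
--     "structure fire": 2, "cardiac arrest": 2, "hazmat": 2,
--     "traffic accident": 3, "medical emergency": 3,
--     "noise complaint": 4, "parking violation": 5,
-- }
--
-- def _auto_triage_priority(description: str) -> Optional[int]:
--     """Derive priority from description keywords."""
--     desc_lower = description.lower()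
--     best = None
--     for keyword, priority in AUTO_TRIAGE_KEYWORDS.items():
--         if keyword in desc_lower:
--             if best is None or priority < best:
--                 best = priority
--     return best
-- ===== SOURCE B (Python) =====
-- from typing import Any, Optional
--
-- AUTO_TRIAGE_KEYWORDS: dict[str, int] = {
--     "explosion": 1, "active shooter": 1, "mass casualty": 1,
--     "structure fire": 2, "cardiac arrest": 2, "hazmat": 2,
--     "traffic accident": 3, "medical emergency": 3,
--     "noise complaint": 4, "parking violation": 5,
-- }
--
-- _TRIAGE_BY_PRIORITY = sorted(AUTO_TRIAGE_KEYWORDS.items(), key=lambda kv: kv[1])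
--
-- def _auto_triage_priority(description: str) -> Optional[int]:
--     """Derive priority from description keywords."""
--     desc_lower = description.lower()
--     for keyword, priority in _TRIAGE_BY_PRIORITY:
--         if keyword in desc_lower:
--             return priority
--     return None
-- ===== Notes on version B (the rewrite author's own statement) =====
-- stated objective: alternative
-- what changed: B pre-sorts the keyword table by priority once at module load and returns the first matching keyword's priority (early exit), instead of A's full scan over all keywords with None/min tracking.
import Mathlib
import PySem

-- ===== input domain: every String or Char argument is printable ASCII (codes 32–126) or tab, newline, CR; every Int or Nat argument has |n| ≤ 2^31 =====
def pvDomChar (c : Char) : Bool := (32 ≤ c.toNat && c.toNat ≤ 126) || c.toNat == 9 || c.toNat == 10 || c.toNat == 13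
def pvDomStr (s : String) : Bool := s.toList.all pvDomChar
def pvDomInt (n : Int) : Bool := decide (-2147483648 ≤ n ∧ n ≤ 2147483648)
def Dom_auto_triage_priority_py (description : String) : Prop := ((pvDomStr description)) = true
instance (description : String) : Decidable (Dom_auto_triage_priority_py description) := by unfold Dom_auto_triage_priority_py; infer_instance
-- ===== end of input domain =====

-- B replaces the full scan with min-tracking by a single ordered early-exit pass over
-- the keywords pre-sorted by priority (objective: alternative decomposition, same cost).

-- ===== PORT A =====
-- AUTO_TRIAGE_KEYWORDS.items() in insertion order
def autoTriageKeywords : List (String × Int) :=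
  [("explosion", 1), ("active shooter", 1), ("mass casualty", 1),
   ("structure fire", 2), ("cardiac arrest", 2), ("hazmat", 2),
   ("traffic accident", 3), ("medical emergency", 3),
   ("noise complaint", 4), ("parking violation", 5)]

def auto_triage_priority_py (description : String) : Option Int :=
  let descLower := PySem.Str.lower description
  autoTriageKeywords.foldl
    (fun best kv =>
      if PySem.Str.isIn kv.1 descLower then
        match best with
        | none => some kv.2
        | some b => if kv.2 < b then some kv.2 else some b
      else best)
    none

-- ===== PORT B =====
-- _TRIAGE_BY_PRIORITY = sorted(AUTO_TRIAGE_KEYWORDS.items(), key=lambda kv: kv[1])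
def triageByPriority : List (String × Int) :=
  PySem.List.sorted autoTriageKeywords (fun kv => kv.2) false

-- first keyword (in priority order) found in desc_lower; None after the loop
def triageFirstMatch (descLower : String) : List (String × Int) → Option Int
  | [] => none
  | (kw, p) :: rest =>
      if PySem.Str.isIn kw descLower then some p else triageFirstMatch descLower rest

def auto_triage_priority_py_alt (description : String) : Option Int :=
  let descLower := PySem.Str.lower description
  triageFirstMatch descLower triageByPriority

-- ===== PRECONDITION & SPEC =====
def Spec_auto_triage_priority_py (description : String) (out : Option Int) : Prop := out = auto_triage_priority_py_alt description
instance (description : String) (out : Option Int) : Decidable (Spec_auto_triage_priority_py description out) := by unfold Spec_auto_triage_priority_py; infer_instance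

-- ===== CLAIM (what is proved, stated in full; the proofs are below) =====
def Claim_equal_auto_triage_priority_py : Prop := ∀ (description : String), Dom_auto_triage_priority_py description → Spec_auto_triage_priority_py description (auto_triage_priority_py description)

-- ===== LEMMAS AND PROOFS =====

-- the stable sort of the concrete keyword table, named explicitly
lemma triageByPriority_eq :
    triageByPriority =
      [("explosion", 1), ("active shooter", 1), ("mass casualty", 1),
       ("structure fire", 2), ("cardiac arrest", 2), ("hazmat", 2),
       ("traffic accident", 3), ("medical emergency", 3),
       ("noise complaint", 4), ("parking violation", 5)] := by
  decide

-- ===== VERDICT (by name: the statement is the Claim_ definition above) =====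
theorem auto_triage_priority_py_spec : Claim_equal_auto_triage_priority_py := by
  intro description _
  unfold Spec_auto_triage_priority_py auto_triage_priority_py auto_triage_priority_py_alt
  rw [triageByPriority_eq]
  simp only [autoTriageKeywords, List.foldl, triageFirstMatch]
  generalize PySem.Str.isIn "explosion" (PySem.Str.lower description) = b1
  generalize PySem.Str.isIn "active shooter" (PySem.Str.lower description) = b2
  generalize PySem.Str.isIn "mass casualty" (PySem.Str.lower description) = b3
  generalize PySem.Str.isIn "structure fire" (PySem.Str.lower description) = b4
  generalize PySem.Str.isIn "cardiac arrest" (PySem.Str.lower description) = b5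
  generalize PySem.Str.isIn "hazmat" (PySem.Str.lower description) = b6
  generalize PySem.Str.isIn "traffic accident" (PySem.Str.lower description) = b7
  generalize PySem.Str.isIn "medical emergency" (PySem.Str.lower description) = b8
  generalize PySem.Str.isIn "noise complaint" (PySem.Str.lower description) = b9
  generalize PySem.Str.isIn "parking violation" (PySem.Str.lower description) = b10
  revert b1 b2 b3 b4 b5 b6 b7 b8 b9 b10
  decide
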